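-- pv_equiv track=rewrite | github.com/tristanratz/atomicsents_amr | atomic_amr.py | split_at_node
-- ===== SOURCE A (Python) =====
-- def split_at_node(tree):
--     base_node_tuple = tree[0]
--     top_level_nodes = []
--     list_of_subtrees = []
--     new_subtree = False
--
--     base_node = tree[0][0]
--     for i, subtree in enumerate(tree):
--         if i == 0:
--             continue
--         if subtree[0] == base_node:  # or subtree[2] == base_node:
--             top_level_nodes.append([base_node_tuple, subtree])
--             new_subtree = True
--         else:
--             if new_subtree:
--                 list_of_subtrees.append([subtree])
--                 new_subtree = False
--             else:
--                 if not list_of_subtrees: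
--                     list_of_subtrees.append([subtree])
--                 else:
--                     list_of_subtrees[-1].append(subtree)
--
--     if not top_level_nodes:
--         top_level_nodes = [[base_node_tuple]]
--     return top_level_nodes, list_of_subtrees
-- ===== SOURCE B (Python) =====
-- def split_at_node(tree):
--     base_node_tuple = tree[0]
--     base_node = tree[0][0]
--     rest = tree[1:]
--     top_level_nodes = [[base_node_tuple, st] for st in rest if st[0] == base_node]
--     list_of_subtrees = []
--     i, n = 0, len(rest)
--     while i < n:
--         if rest[i][0] == base_node:
--             i += 1
--         else:
--             j = i
--             while j < n and rest[j][0] != base_node: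
--                 j += 1
--             list_of_subtrees.append(rest[i:j])
--             i = j
--     if not top_level_nodes:
--         top_level_nodes = [[base_node_tuple]]
--     return top_level_nodes, list_of_subtrees
-- ===== Notes on version B (the rewrite author's own statement) =====
-- stated objective: alternative
-- what changed: Replaces A's single flag-state loop by two independent passes: a comprehension collects the top-level nodes, and a run-scanning two-pointer sweep emits each maximal run of non-matching nodes as one subtree, eliminating the new_subtree flag and the append-to-last-group mutation.
import Mathlib
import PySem

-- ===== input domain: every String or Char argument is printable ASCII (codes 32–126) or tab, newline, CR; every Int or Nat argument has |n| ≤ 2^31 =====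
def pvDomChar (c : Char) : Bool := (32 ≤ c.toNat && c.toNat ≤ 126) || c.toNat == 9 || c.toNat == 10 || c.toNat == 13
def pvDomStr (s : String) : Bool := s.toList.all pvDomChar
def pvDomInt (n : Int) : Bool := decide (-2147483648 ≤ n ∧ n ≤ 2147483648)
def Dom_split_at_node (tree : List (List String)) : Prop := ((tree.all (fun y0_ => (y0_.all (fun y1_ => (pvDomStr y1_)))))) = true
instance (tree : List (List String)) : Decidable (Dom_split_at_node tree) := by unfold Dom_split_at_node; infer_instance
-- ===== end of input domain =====

-- B replaces A's single flag-state loop by two independent passes (a comprehension for the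
-- top-level nodes and a run-scanning sweep for the subtrees): an alternative decomposition,
-- the same cost.  Equivalence of the RETURN values on Pre_ (inputs where the Python A returns).

-- ===== PORT A =====
-- step of A's 'for i, subtree in enumerate(tree)' loop; state = (top_level_nodes, list_of_subtrees, new_subtree).
-- subtree[0] is ported as headD "" (exact under Pre_, which makes every element nonempty);
-- 'list_of_subtrees[-1].append(subtree)' is ported as dropLast ++ [getLast! ++ [subtree]].
def aStep (bt : List String) (base : String)
    (s : List (List (List String)) × List (List (List String)) × Bool)
    (p : Int × List String) :
    List (List (List String)) × List (List (List String)) × Bool :=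
  if p.1 == 0 then s
  else
    let subtree := p.2
    if subtree.headD "" == base then (s.1 ++ [[bt, subtree]], s.2.1, true)
    else if s.2.2 then (s.1, s.2.1 ++ [[subtree]], false)
    else if s.2.1.isEmpty then (s.1, s.2.1 ++ [[subtree]], false)
    else (s.1, s.2.1.dropLast ++ [s.2.1.getLast! ++ [subtree]], false)

def split_at_node (tree : List (List String)) : List (List (List String)) × List (List (List String)) :=
  let base_node_tuple := tree.headD []            -- tree[0], exact under Pre_
  let base_node := base_node_tuple.headD ""       -- tree[0][0], exact under Pre_
  let r := (PySem.List.enumerate tree 0).foldl (aStep base_node_tuple base_node) ([], [], false)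
  ((if r.1.isEmpty then [[base_node_tuple]] else r.1), r.2.1)

-- ===== PORT B =====
-- B's run-scanning sweep: skip a matching node; on a non-matching node take the whole
-- maximal non-matching run as one subtree and continue after it (Source B's two-pointer while loop).
def collectSubs (base : String) : List (List String) → List (List (List String))
  | [] => []
  | st :: rest =>
    if st.headD "" == base then collectSubs base rest
    else (st :: rest.takeWhile (fun t => !(t.headD "" == base))) ::
         collectSubs base (rest.dropWhile (fun t => !(t.headD "" == base)))
termination_by l => l.length
decreasing_by
  · simp
  · exact Nat.lt_succ_of_le (List.length_dropWhile_le _ _)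

def split_at_node_alt (tree : List (List String)) : List (List (List String)) × List (List (List String)) :=
  let base_node_tuple := tree.headD []            -- tree[0], exact under Pre_
  let base_node := base_node_tuple.headD ""       -- tree[0][0], exact under Pre_
  let rest := tree.drop 1                         -- tree[1:]
  let top_level_nodes := (rest.filter (fun st => st.headD "" == base_node)).map
      (fun st => [base_node_tuple, st])
  let list_of_subtrees := collectSubs base_node rest
  ((if top_level_nodes.isEmpty then [[base_node_tuple]] else top_level_nodes), list_of_subtrees)

-- ===== PRECONDITION & SPEC =====
-- Pre_ excludes exactly the inputs where the Python A raises IndexError: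
-- an empty tree (tree[0]) or any empty element (subtree[0]).
def Pre_split_at_node (tree : List (List String)) : Prop :=
  tree ≠ [] ∧ ∀ st ∈ tree, st ≠ []
instance (tree : List (List String)) : Decidable (Pre_split_at_node tree) := by
  unfold Pre_split_at_node; infer_instance

def pvWitness_split_at_node : List (List String) :=
  [["a", "x"], ["b"], ["c"], ["a", "y"], ["a"], ["d"]]

def Spec_split_at_node (tree : List (List String)) (out : List (List (List String)) × List (List (List String))) : Prop := out = split_at_node_alt tree
instance (tree : List (List String)) (out : List (List (List String)) × List (List (List String))) : Decidable (Spec_split_at_node tree out) := by unfold Spec_split_at_node; infer_instance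

-- ===== CLAIM (what is proved, stated in full; the proofs are below) =====
def Claim_equal_split_at_node : Prop := ∀ (tree : List (List String)), Dom_split_at_node tree → Pre_split_at_node tree → Spec_split_at_node tree (split_at_node tree)

-- ===== LEMMAS AND PROOFS =====

-- A's loop body once the i == 0 guard has been passed.
def stepBody (bt : List String) (base : String)
    (s : List (List (List String)) × List (List (List String)) × Bool)
    (subtree : List String) :
    List (List (List String)) × List (List (List String)) × Bool :=
  if subtree.headD "" == base then (s.1 ++ [[bt, subtree]], s.2.1, true)
  else if s.2.2 then (s.1, s.2.1 ++ [[subtree]], false)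
  else if s.2.1.isEmpty then (s.1, s.2.1 ++ [[subtree]], false)
  else (s.1, s.2.1.dropLast ++ [s.2.1.getLast! ++ [subtree]], false)

def topsOf (bt : List String) (base : String) (l : List (List String)) : List (List (List String)) :=
  (l.filter (fun st => st.headD "" == base)).map (fun st => [bt, st])

lemma stepBody_match (bt : List String) (base : String) (s) (st : List String)
    (h : (st.headD "" == base) = true) :
    stepBody bt base s st = (s.1 ++ [[bt, st]], s.2.1, true) := by
  have h2 : st.head?.getD "" = base := by simpa using h
  simp [stepBody, h2]

lemma stepBody_nomatch_true (bt : List String) (base : String) (t u) (st : List String)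
    (h : (st.headD "" == base) = false) :
    stepBody bt base (t, u, true) st = (t, u ++ [[st]], false) := by
  have h2 : ¬ st.head?.getD "" = base := by simpa using h
  simp [stepBody, h2]

lemma stepBody_nomatch_false_nil (bt : List String) (base : String) (t) (st : List String)
    (h : (st.headD "" == base) = false) :
    stepBody bt base (t, [], false) st = (t, [[st]], false) := by
  have h2 : ¬ st.head?.getD "" = base := by simpa using h
  simp [stepBody, h2]

lemma stepBody_nomatch_false_concat (bt : List String) (base : String) (t u g) (st : List String)
    (h : (st.headD "" == base) = false) :
    stepBody bt base (t, u ++ [g], false) st = (t, u ++ [g ++ [st]], false) := by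
  have h2 : ¬ st.head?.getD "" = base := by simpa using h
  simp [stepBody, h2]

lemma collectSubs_nil (base : String) : collectSubs base [] = [] := by
  simp [collectSubs]

lemma collectSubs_match (base : String) (st : List String) (r : List (List String))
    (h : (st.headD "" == base) = true) :
    collectSubs base (st :: r) = collectSubs base r := by
  have h2 : st.head?.getD "" = base := by simpa using h
  rw [collectSubs]; simp [h2]

lemma collectSubs_nomatch (base : String) (st : List String) (r : List (List String))
    (h : (st.headD "" == base) = false) :
    collectSubs base (st :: r) =
      (st :: r.takeWhile (fun t => !(t.headD "" == base))) ::
        collectSubs base (r.dropWhile (fun t => !(t.headD "" == base))) := by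
  have h2 : ¬ st.head?.getD "" = base := by simpa using h
  rw [collectSubs]; simp [h2]

lemma topsOf_cons_match (bt : List String) (base : String) (st : List String) (l : List (List String))
    (h : (st.headD "" == base) = true) :
    topsOf bt base (st :: l) = [bt, st] :: topsOf bt base l := by
  have h2 : st.head?.getD "" = base := by simpa using h
  simp [topsOf, h2]

lemma topsOf_cons_nomatch (bt : List String) (base : String) (st : List String) (l : List (List String))
    (h : (st.headD "" == base) = false) :
    topsOf bt base (st :: l) = topsOf bt base l := by
  have h2 : ¬ st.head?.getD "" = base := by simpa using h
  simp [topsOf, h2]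

lemma aStep_pos (bt : List String) (base : String) (s) (k : Int) (st) (hk : 1 ≤ k) :
    aStep bt base s (k, st) = stepBody bt base s st := by
  have : (k == 0) = false := by simp; omega
  simp [aStep, stepBody, this]

lemma fold_enum (bt : List String) (base : String) :
    ∀ (l : List (List String)) (k : Int) (s), 1 ≤ k →
      (PySem.List.enumerate l k).foldl (aStep bt base) s = l.foldl (stepBody bt base) s := by
  intro l
  induction l with
  | nil => intro k s _; simp [PySem.List.enumerate_nil]
  | cons x xs ih =>
      intro k s hk
      rw [PySem.List.enumerate_cons, List.foldl_cons, List.foldl_cons,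
        aStep_pos bt base s k x hk, ih (k+1) _ (by omega)]

-- The central invariant for A's flag-state loop, in two parts:
-- (P) flag false with a nonempty subtree list: the leading non-matching run extends the last group;
-- (Q) flag true: the remainder contributes its collectSubs groups verbatim.
lemma loop_invariant (bt : List String) (base : String) :
    ∀ l : List (List String),
      ((∀ tops subs0 g, ∃ f,
          l.foldl (stepBody bt base) (tops, subs0 ++ [g], false)
            = (tops ++ topsOf bt base l,
               subs0 ++ ((g ++ l.takeWhile (fun t => !(t.headD "" == base))) ::
                 collectSubs base (l.dropWhile (fun t => !(t.headD "" == base)))), f))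
      ∧ (∀ tops subs, ∃ f,
          l.foldl (stepBody bt base) (tops, subs, true)
            = (tops ++ topsOf bt base l, subs ++ collectSubs base l, f))) := by
  intro l
  induction l with
  | nil =>
      constructor
      · intro tops subs0 g
        exact ⟨false, by simp [topsOf, collectSubs_nil]⟩
      · intro tops subs
        exact ⟨true, by simp [topsOf, collectSubs_nil]⟩
  | cons st l' ih =>
      obtain ⟨ihP, ihQ⟩ := ih
      constructor
      · intro tops subs0 g
        by_cases h : (st.headD "" == base) = true
        · obtain ⟨f, hf⟩ := ihQ (tops ++ [[bt, st]]) (subs0 ++ [g])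
          refine ⟨f, ?_⟩
          rw [List.foldl_cons, stepBody_match bt base _ st h, hf,
            topsOf_cons_match bt base st l' h,
            List.takeWhile_cons_of_neg (by simp; simpa using h),
            List.dropWhile_cons_of_neg (by simp; simpa using h),
            collectSubs_match base st l' h]
          simp
        · have h' : (st.headD "" == base) = false := by simpa using h
          obtain ⟨f, hf⟩ := ihP tops subs0 (g ++ [st])
          refine ⟨f, ?_⟩
          rw [List.foldl_cons, stepBody_nomatch_false_concat bt base tops subs0 g st h', hf,
            topsOf_cons_nomatch bt base st l' h',
            List.takeWhile_cons_of_pos (by simp; simpa using h'),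
            List.dropWhile_cons_of_pos (by simp; simpa using h')]
          simp
      · intro tops subs
        by_cases h : (st.headD "" == base) = true
        · obtain ⟨f, hf⟩ := ihQ (tops ++ [[bt, st]]) subs
          refine ⟨f, ?_⟩
          rw [List.foldl_cons, stepBody_match bt base _ st h, hf,
            topsOf_cons_match bt base st l' h, collectSubs_match base st l' h]
          simp
        · have h' : (st.headD "" == base) = false := by simpa using h
          obtain ⟨f, hf⟩ := ihP tops subs [st]
          refine ⟨f, ?_⟩
          rw [List.foldl_cons, stepBody_nomatch_true bt base tops subs st h', hf,
            topsOf_cons_nomatch bt base st l' h', collectSubs_nomatch base st l' h']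
          simp
      
-- the initial state (flag false, no subtrees) behaves like a fresh start
lemma loop_fresh (bt : List String) (base : String) (l : List (List String)) (tops) :
    ∃ f, l.foldl (stepBody bt base) (tops, [], false)
      = (tops ++ topsOf bt base l, collectSubs base l, f) := by
  cases l with
  | nil => exact ⟨false, by simp [topsOf, collectSubs_nil]⟩
  | cons st l' =>
      by_cases h : (st.headD "" == base) = true
      · obtain ⟨f, hf⟩ := (loop_invariant bt base l').2 (tops ++ [[bt, st]]) []
        refine ⟨f, ?_⟩
        rw [List.foldl_cons, stepBody_match bt base _ st h, hf,
          topsOf_cons_match bt base st l' h, collectSubs_match base st l' h]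
        simp
      · have h' : (st.headD "" == base) = false := by simpa using h
        obtain ⟨f, hf⟩ := (loop_invariant bt base l').1 tops [] [st]
        refine ⟨f, ?_⟩
        rw [List.foldl_cons, stepBody_nomatch_false_nil bt base tops st h',
          show ([[st]] : List (List (List String))) = [] ++ [[st]] from rfl, hf,
          topsOf_cons_nomatch bt base st l' h', collectSubs_nomatch base st l' h']
        simp

-- ===== VERDICT (by name: the statement is the Claim_ definition above) =====
theorem split_at_node_spec : Claim_equal_split_at_node := by
  intro tree _ _
  unfold Spec_split_at_node split_at_node split_at_node_alt
  cases tree with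
  | nil => simp [PySem.List.enumerate_nil, collectSubs_nil]
  | cons t0 rest =>
      simp only [List.headD_cons, List.drop_one, List.tail_cons]
      rw [PySem.List.enumerate_cons, List.foldl_cons,
        show aStep t0 (t0.headD "") ([], [], false) ((0 : Int), t0) = ([], [], false) from by
          simp [aStep],
        fold_enum t0 (t0.headD "") rest (0 + 1) _ (by omega)]
      obtain ⟨f, hf⟩ := loop_fresh t0 (t0.headD "") rest []
      rw [hf]
      simp [topsOf]
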